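-- pv_equiv track=rewrite | github.com/AviadP/opsschool3-coding | home-assignments/session1/solution1.py | sort_output_data
-- ===== SOURCE A (Python) =====
-- def sort_output_data(data):
--     buckets_list = data[1]
--     pairs = []
--     for i in range(0, len(buckets_list) - 1):
--         pairs.append([buckets_list[i], buckets_list[i + 1]])
--
--     result_dict = {}
--     for pair in pairs:
--         ages = "{0} - {1}".format(pair[0], pair[1])
--         result_dict[ages] = []
--         for key, value in data[0].items():
--             if (min(pair)) <= value < (max(pair)):
--                 result_dict[ages].append(key)
--
--     return result_dict
-- ===== SOURCE B (Python) =====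
-- def _bisect_left(a, x):
--     lo, hi = 0, len(a)
--     while lo < hi:
--         mid = (lo + hi) // 2
--         if a[mid] < x:
--             lo = mid + 1
--         else:
--             hi = mid
--     return lo
--
--
-- def sort_output_data(data):
--     items = list(data[0].items())
--     # indices of the items sorted by value: vals below is then a sorted array
--     order = sorted(range(len(items)), key=lambda i: items[i][1])
--     vals = [items[i][1] for i in order]
--     boundaries = data[1]
--     result = {}
--     for a, b in zip(boundaries, boundaries[1:]):
--         lo, hi = (a, b) if a <= b else (b, a)
--         left = _bisect_left(vals, lo)
--         right = _bisect_left(vals, hi)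
--         # order[left:right] holds exactly the item indices whose value is in
--         # [lo, hi); sorting them restores the original dict order of the keys
--         result["{0} - {1}".format(a, b)] = [items[i][0] for i in sorted(order[left:right])]
--     return result
-- ===== Notes on version B (the rewrite author's own statement) =====
-- stated objective: faster
-- what changed: Instead of rescanning every dict item once per bucket pair, B sorts the item indices by value once, locates each bucket's members as one contiguous slice of that sorted array via two hand-written binary searches, and re-sorts the slice's indices to restore the dict's key order.
import Mathlib
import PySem

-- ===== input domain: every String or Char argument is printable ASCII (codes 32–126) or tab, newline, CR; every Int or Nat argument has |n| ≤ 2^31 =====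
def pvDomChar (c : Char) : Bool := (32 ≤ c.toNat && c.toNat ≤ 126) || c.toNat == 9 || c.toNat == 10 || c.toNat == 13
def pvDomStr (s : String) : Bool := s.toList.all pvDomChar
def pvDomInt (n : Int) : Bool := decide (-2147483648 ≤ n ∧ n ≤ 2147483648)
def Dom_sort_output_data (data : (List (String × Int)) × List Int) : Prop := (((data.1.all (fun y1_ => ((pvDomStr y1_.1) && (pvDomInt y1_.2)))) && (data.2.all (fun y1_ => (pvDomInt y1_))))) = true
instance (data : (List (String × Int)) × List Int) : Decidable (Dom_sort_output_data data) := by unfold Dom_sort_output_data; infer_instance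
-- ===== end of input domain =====

-- B replaces A's per-bucket rescan of the whole dict by sort + binary search: the items are
-- sorted by value once, each bucket's members are found as one contiguous slice via two
-- binary searches, and the slice's indices are re-sorted to restore the dict's key order.

-- ===== PORT A =====
def sort_output_data (data : (List (String × Int)) × List Int) : List (String × List String) :=
  let buckets_list := data.2
  -- for i in range(0, len(buckets_list) - 1): pairs.append([buckets_list[i], buckets_list[i+1]])
  -- (indices are always in range, so the total pyGetD form is exact)
  let pairs : List (Int × Int) :=
    (PySem.List.pyRange 0 ((buckets_list.length : Int) - 1) 1).foldl
      (fun acc i => acc ++ [(PySem.List.pyGetD buckets_list i 0, PySem.List.pyGetD buckets_list (i + 1) 0)]) []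
  let result_dict : PySem.Dict String (List String) :=
    pairs.foldl (fun d pair =>
      let ages := PySem.Int.toStr pair.1 ++ " - " ++ PySem.Int.toStr pair.2
      let d := d.insert ages []
      -- for key, value in data[0].items(): if min(pair) <= value < max(pair): result_dict[ages].append(key)
      data.1.foldl (fun d kv =>
        if min pair.1 pair.2 ≤ kv.2 ∧ kv.2 < max pair.1 pair.2 then
          d.insert ages (d.getD ages [] ++ [kv.1])
        else d) d) PySem.Dict.empty
  result_dict.items

-- ===== PORT B =====
-- Source B's hand-written `_bisect_left` is the textbook bisect_left loop; PySem.List.bisectLeft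
-- is that same lo/hi/mid loop, so it is the faithful port of it.
def sort_output_data_alt (data : (List (String × Int)) × List Int) : List (String × List String) :=
  let items := data.1
  -- order = sorted(range(len(items)), key=lambda i: items[i][1])   (index always in range)
  let order : List Nat :=
    PySem.List.sorted (List.range items.length) (fun i => (items.getD i ("", 0)).2) false
  let vals : List Int := order.map (fun i => (items.getD i ("", 0)).2)
  let boundaries := data.2
  let result : PySem.Dict String (List String) :=
    (boundaries.zip boundaries.tail).foldl (fun d p =>
      let q : Int × Int := if p.1 ≤ p.2 then (p.1, p.2) else (p.2, p.1)
      let left := PySem.List.bisectLeft vals q.1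
      let right := PySem.List.bisectLeft vals q.2
      d.insert (PySem.Int.toStr p.1 ++ " - " ++ PySem.Int.toStr p.2)
        ((PySem.List.sorted
            (PySem.List.slice order (some (left : Int)) (some (right : Int)))
            (fun i => i) false).map (fun i => (items.getD i ("", 0)).1)))
      PySem.Dict.empty
  result.items

-- ===== PRECONDITION & SPEC =====
def Spec_sort_output_data (data : (List (String × Int)) × List Int) (out : List (String × List String)) : Prop := out = sort_output_data_alt data
instance (data : (List (String × Int)) × List Int) (out : List (String × List String)) : Decidable (Spec_sort_output_data data out) := by unfold Spec_sort_output_data; infer_instance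

-- ===== CLAIM (what is proved, stated in full; the proofs are below) =====
def Claim_equal_sort_output_data : Prop := ∀ (data : (List (String × Int)) × List Int), Dom_sort_output_data data → Spec_sort_output_data data (sort_output_data data)

-- ===== LEMMAS AND PROOFS =====

def pvLbl (p : Int × Int) : String := PySem.Int.toStr p.1 ++ " - " ++ PySem.Int.toStr p.2
def pvFill (items : List (String × Int)) (q : Int × Int) : List String :=
  (items.filter (fun kv => decide (q.1 ≤ kv.2 ∧ kv.2 < q.2))).map (fun kv => kv.1)

-- Lemma 1: A's pair-building loop is zip of consecutive boundaries
theorem pv_pairs_eq (bl : List Int) :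
    (PySem.List.pyRange 0 ((bl.length : Int) - 1) 1).foldl
      (fun acc i => acc ++ [(PySem.List.pyGetD bl i 0, PySem.List.pyGetD bl (i + 1) 0)]) []
    = bl.zip bl.tail := by
  rw [PySem.List.foldl_append_singleton_eq_map]
  rw [PySem.List.pyRange_one]
  rw [List.map_map]
  apply List.ext_getElem
  · simp [List.length_zip]
  · intro i h1 h2
    have hi : i < bl.length - 1 := by
      simp at h1; omega
    simp only [List.nil_append, List.getElem_map, List.getElem_range, Function.comp_apply]
    have h0 : (0 : Int) + (i : Int) = ((i : Nat) : Int) := by omega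
    rw [h0, PySem.List.pyGetD_natCast]
    have h1' : ((i : Nat) : Int) + 1 = (((i + 1 : Nat)) : Int) := by omega
    rw [h1', PySem.List.pyGetD_natCast]
    rw [List.getElem_zip]
    simp [List.getElem_tail, List.getD_eq_getElem?_getD, List.getElem?_eq_getElem (by omega : i < bl.length),
      List.getElem?_eq_getElem (show i + 1 < bl.length by omega)]

-- Lemma 2: A's inner loop over the dict items, started right after `result_dict[ages] = []`
theorem pv_a_inner (l : List (String × Int)) (q : Int × Int) (ages : String)
    (d : PySem.Dict String (List String)) (v : List String) :
    l.foldl (fun d kv =>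
        if q.1 ≤ kv.2 ∧ kv.2 < q.2 then d.insert ages (d.getD ages [] ++ [kv.1]) else d)
      (d.insert ages v)
    = d.insert ages (v ++ pvFill l q) := by
  induction l generalizing v with
  | nil => simp [pvFill]
  | cons kv l ih =>
    simp only [List.foldl_cons]
    by_cases h : q.1 ≤ kv.2 ∧ kv.2 < q.2
    · rw [if_pos h, PySem.Dict.getD_insert_self, PySem.Dict.insert_insert_self, ih]
      simp [pvFill, h]
    · rw [if_neg h, ih]
      simp [pvFill, h]

-- a list whose positions in [L,R) are exactly the ones satisfying P filters to its [L,R) window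
theorem pv_filter_eq_drop_take {α : Type} (xs : List α) (P : α → Bool) (L R : Nat)
    (hLR : L ≤ R) (hR : R ≤ xs.length)
    (h : ∀ (j : Nat) (hj : j < xs.length), P xs[j] = decide (L ≤ j ∧ j < R)) :
    xs.filter P = (xs.drop L).take (R - L) := by
  have hsplit1 : xs = xs.take L ++ xs.drop L := (List.take_append_drop L xs).symm
  have hsplit2 : xs.drop L = (xs.drop L).take (R - L) ++ (xs.drop L).drop (R - L) :=
    (List.take_append_drop (R - L) (xs.drop L)).symm
  have hdd : (xs.drop L).drop (R - L) = xs.drop R := by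
    rw [List.drop_drop]; congr 1; omega
  conv_lhs => rw [hsplit1, hsplit2, hdd]
  rw [List.filter_append, List.filter_append]
  have h1 : (xs.take L).filter P = [] := by
    rw [List.filter_eq_nil_iff]
    intro a ha
    obtain ⟨j, hj, hja⟩ := List.mem_iff_getElem.mp ha
    have hjL : j < L := by simpa using hj.trans_le (by simp)
    have hjx : j < xs.length := by omega
    have := h j hjx
    rw [List.getElem_take] at hja
    rw [hja] at this
    simp only [this, decide_eq_true_eq, not_and, not_lt]
    omega
  have h2 : ((xs.drop L).take (R - L)).filter P = (xs.drop L).take (R - L) := by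
    rw [List.filter_eq_self]
    intro a ha
    obtain ⟨j, hj, hja⟩ := List.mem_iff_getElem.mp ha
    have hjlen : j < R - L := by
      have := hj
      simp [List.length_take, List.length_drop] at this
      omega
    have hjx : L + j < xs.length := by omega
    have := h (L + j) hjx
    rw [List.getElem_take, List.getElem_drop] at hja
    rw [hja] at this
    simp only [this, decide_eq_true_eq]
    omega
  have h3 : (xs.drop R).filter P = [] := by
    rw [List.filter_eq_nil_iff]
    intro a ha
    obtain ⟨j, hj, hja⟩ := List.mem_iff_getElem.mp ha
    have hjx : R + j < xs.length := by
      have := hj; simp [List.length_drop] at this; omega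
    have := h (R + j) hjx
    rw [List.getElem_drop] at hja
    rw [hja] at this
    simp only [this, decide_eq_true_eq, not_and, not_lt]
    omega
  rw [h1, h2, h3, List.append_nil, List.nil_append]

-- reading a per-index predicate/projection through range-indexing is filtering the list itself
theorem pv_range_filter_map (items : List (String × Int)) (lo hi : Int) :
    ((List.range items.length).filter
        (fun i => decide (lo ≤ (items.getD i ("", 0)).2 ∧ (items.getD i ("", 0)).2 < hi))).map
      (fun i => (items.getD i ("", 0)).1)
    = pvFill items (lo, hi) := by
  induction items with
  | nil => simp [pvFill]
  | cons kv rest ih =>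
    rw [List.length_cons, List.range_succ_eq_map]
    rw [List.filter_cons, List.filter_map]
    have hcomp : ((fun i => decide (lo ≤ ((kv :: rest).getD i ("", 0)).2 ∧ ((kv :: rest).getD i ("", 0)).2 < hi)) ∘ Nat.succ)
        = (fun i => decide (lo ≤ (rest.getD i ("", 0)).2 ∧ (rest.getD i ("", 0)).2 < hi)) := by
      funext i; rfl
    rw [hcomp]
    by_cases h : lo ≤ kv.2 ∧ kv.2 < hi
    · simp only [List.getD_cons_zero, h, and_self, decide_true, if_pos]
      rw [List.map_cons, List.map_map]
      have hmaps : ((fun i => ((kv :: rest).getD i ("", 0)).1) ∘ Nat.succ)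
          = (fun i => (rest.getD i ("", 0)).1) := by
        funext i; rfl
      rw [hmaps, ih]
      simp [pvFill, h]
    · simp only [List.getD_cons_zero, decide_eq_true_eq, h, if_neg, not_false_iff]
      rw [List.map_map]
      have hmaps : ((fun i => ((kv :: rest).getD i ("", 0)).1) ∘ Nat.succ)
          = (fun i => (rest.getD i ("", 0)).1) := by
        funext i; rfl
      rw [hmaps, ih]
      simp [pvFill, h]

-- Main per-bucket lemma: B's sort + two binary searches + index re-sort computes exactly
-- A's "keys of the items whose value lies in [lo, hi), in dict order".
theorem pv_bucket (items : List (String × Int)) (lo hi : Int) (hlohi : lo ≤ hi) :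
    ((PySem.List.sorted
        (PySem.List.slice
          (PySem.List.sorted (List.range items.length) (fun i => (items.getD i ("", 0)).2) false)
          (some ((PySem.List.bisectLeft
            ((PySem.List.sorted (List.range items.length) (fun i => (items.getD i ("", 0)).2) false).map
              (fun i => (items.getD i ("", 0)).2)) lo : Nat) : Int))
          (some ((PySem.List.bisectLeft
            ((PySem.List.sorted (List.range items.length) (fun i => (items.getD i ("", 0)).2) false).map
              (fun i => (items.getD i ("", 0)).2)) hi : Nat) : Int)))
        (fun i => i) false).map (fun i => (items.getD i ("", 0)).1))
    = pvFill items (lo, hi) := by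
  set f : Nat → Int := fun i => (items.getD i ("", 0)).2 with hf
  set order := PySem.List.sorted (List.range items.length) f false with horder
  set vals := order.map f with hvals
  set L := PySem.List.bisectLeft vals lo with hL
  set R := PySem.List.bisectLeft vals hi with hR
  have hsortedvals : vals.Pairwise (· ≤ ·) := PySem.List.sorted_map_key_pairwise _ _
  obtain ⟨hLlen, hLlt, hLge⟩ := PySem.List.bisectLeft_spec vals lo hsortedvals
  obtain ⟨hRlen, hRlt, hRge⟩ := PySem.List.bisectLeft_spec vals hi hsortedvals
  have hvlen : vals.length = order.length := by rw [hvals, List.length_map]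
  have hLR : L ≤ R := by
    by_contra hc
    have hRv : R < vals.length := by omega
    have h1 := hLlt R hRv (by omega)
    have h2 := hRge R hRv (by omega)
    omega
  -- the slice is the filter of order
  have hslice : PySem.List.slice order (some (L : Int)) (some (R : Int))
      = order.filter (fun i => decide (lo ≤ f i ∧ f i < hi)) := by
    rw [PySem.List.slice_natCast]
    symm
    apply pv_filter_eq_drop_take order _ L R hLR (by omega)
    intro j hj
    have hjv : j < vals.length := by omega
    have hvj : vals[j]'hjv = f (order[j]'hj) := by
      simp only [hvals, List.getElem_map]
    simp only [decide_eq_decide]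
    constructor
    · intro hx
      rcases Nat.lt_or_ge j L with hjL | hjL
      · have := hLlt j hjv hjL
        rw [hvj] at this; omega
      · refine ⟨hjL, ?_⟩
        rcases Nat.lt_or_ge j R with hjR | hjR
        · exact hjR
        · have := hRge j hjv hjR
          rw [hvj] at this; omega
    · intro hx
      have h1 := hLge j hjv hx.1
      have h2 := hRlt j hjv hx.2
      rw [hvj] at h1 h2
      exact ⟨h1, h2⟩
  rw [hslice]
  -- the sorted filtered indices are the filtered range
  have hperm : ((List.range items.length).filter (fun i => decide (lo ≤ f i ∧ f i < hi))).Perm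
      (order.filter (fun i => decide (lo ≤ f i ∧ f i < hi))) :=
    (PySem.List.sorted_perm (List.range items.length) f false).symm.filter _
  have hpw : ((List.range items.length).filter (fun i => decide (lo ≤ f i ∧ f i < hi))).Pairwise
      (fun a b => (fun i : Nat => i) a < (fun i : Nat => i) b) := by
    exact (List.pairwise_lt_range).filter _
  rw [PySem.List.sorted_eq_of_perm_of_pairwise_lt
        (order.filter (fun i => decide (lo ≤ f i ∧ f i < hi)))
        ((List.range items.length).filter (fun i => decide (lo ≤ f i ∧ f i < hi)))
        (fun i : Nat => i) hperm hpw]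
  simpa only [hf] using pv_range_filter_map items lo hi

-- normalizing the pair: python's `(a,b) if a<=b else (b,a)` is (min, max)
theorem pv_q_eq (p : Int × Int) :
    (if p.1 ≤ p.2 then (p.1, p.2) else (p.2, p.1)) = (min p.1 p.2, max p.1 p.2) := by
  rcases le_or_gt p.1 p.2 with h | h
  · simp [h]
  · have h' := le_of_lt h
    simp [min_eq_right h', max_eq_left h', not_le.mpr h]

theorem pv_main (data : (List (String × Int)) × List Int) :
    sort_output_data data = sort_output_data_alt data := by
  simp only [sort_output_data, sort_output_data_alt]
  rw [pv_pairs_eq]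
  set items := data.1 with hitems
  -- A's per-pair step is an insert of the full filtered key list
  have hA : (fun (d : PySem.Dict String (List String)) (pair : Int × Int) =>
      items.foldl (fun d kv =>
        if min pair.1 pair.2 ≤ kv.2 ∧ kv.2 < max pair.1 pair.2 then
          d.insert (PySem.Int.toStr pair.1 ++ " - " ++ PySem.Int.toStr pair.2)
            (d.getD (PySem.Int.toStr pair.1 ++ " - " ++ PySem.Int.toStr pair.2) [] ++ [kv.1])
        else d) (d.insert (PySem.Int.toStr pair.1 ++ " - " ++ PySem.Int.toStr pair.2) []))
      = (fun d p => d.insert (pvLbl p) (pvFill items (min p.1 p.2, max p.1 p.2))) := by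
    funext d p
    simpa [pvLbl] using pv_a_inner items (min p.1 p.2, max p.1 p.2) (pvLbl p) d []
  rw [hA]
  -- B's per-pair step computes the same list via pv_bucket
  have hB : (fun (d : PySem.Dict String (List String)) (p : Int × Int) =>
      d.insert (PySem.Int.toStr p.1 ++ " - " ++ PySem.Int.toStr p.2)
        ((PySem.List.sorted
            (PySem.List.slice
              (PySem.List.sorted (List.range items.length) (fun i => (items.getD i ("", 0)).2) false)
              (some ((PySem.List.bisectLeft
                ((PySem.List.sorted (List.range items.length) (fun i => (items.getD i ("", 0)).2) false).map
                  (fun i => (items.getD i ("", 0)).2))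
                (if p.1 ≤ p.2 then (p.1, p.2) else (p.2, p.1)).1 : Nat) : Int))
              (some ((PySem.List.bisectLeft
                ((PySem.List.sorted (List.range items.length) (fun i => (items.getD i ("", 0)).2) false).map
                  (fun i => (items.getD i ("", 0)).2))
                (if p.1 ≤ p.2 then (p.1, p.2) else (p.2, p.1)).2 : Nat) : Int)))
            (fun i => i) false).map (fun i => (items.getD i ("", 0)).1)))
      = (fun d p => d.insert (pvLbl p) (pvFill items (min p.1 p.2, max p.1 p.2))) := by
    funext d p
    rw [pv_q_eq p]
    rw [pv_bucket items (min p.1 p.2) (max p.1 p.2) (min_le_max)]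
    rfl
  rw [hB]

-- ===== VERDICT (by name: the statement is the Claim_ definition above) =====
theorem sort_output_data_spec : Claim_equal_sort_output_data := by
  intro data _
  unfold Spec_sort_output_data
  exact pv_main data
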